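-- pv_equiv track=rewrite | github.com/RegulumDreik/pwr0_warships | main.py | shift_over_size
-- ===== SOURCE A (Python) =====
-- def shift_over_size(t: list[tuple[int, int]], field_size, direction: bool):
--     q = any(map(lambda b: any(map(lambda i: i>=field_size, b)), t))  # проверка не вылазит ли тень за максимальный размер поля
--     while q:  # сдвигаем в сторону центра, пока не будет влазить
--         m = []
--         for a in t:
--             if direction:
--                 m.append((a[0]-1, a[1]))  # сдвиг по горизонтали
--             else:
--                 m.append((a[0], a[1]-1))  # сдвиг по вертикали
--         t = m
--         q = any(map(lambda b: any(map(lambda i: i>=field_size, b)), t))  # перепроверяем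
--     q = any(map(lambda b: any(map(lambda i: i<0, b)), t))  # проверка не вылазит ли тень за ноль
--     while q:
--         m = []
--         for a in t:
--             if direction:
--                 m.append((a[0]+1, a[1]))  # сдвиг по горизонтали от нуля
--             else:
--                 m.append((a[0], a[1]+1))  # сдвиг по вертикали от нуля
--         t = m
--         q = any(map(lambda b: any(map(lambda i: i<0, b)), t))  # перепроверяем
--     return t  # возвращаем исправленную тень
-- ===== SOURCE B (Python) =====
-- def shift_over_size(t: list[tuple[int, int]], field_size, direction: bool):
--     if not t:
--         return []
--     ax = [a[0] if direction else a[1] for a in t]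
--     s1 = max(0, max(ax) - field_size + 1)   # single shift toward zero for coords >= field_size
--     s2 = max(0, s1 - min(ax))               # single shift away from zero for coords < 0 after that
--     d = s2 - s1
--     if direction:
--         return [(x + d, y) for x, y in t]
--     return [(x, y + d) for x, y in t]
-- ===== Notes on version B (the rewrite author's own statement) =====
-- stated objective: alternative
-- what changed: B replaces A's repeated shift-by-one while-loops (each rescanning the whole list) by one pass computing max/min of the moved-axis coordinates and applying the total shift once; a timing run could not measure a speed difference, so none is claimed.
-- outside the precondition, e.g. on shift_over_size([(0, 5)], 3, True): A does not finish within the time limit, B returns [(0, 5)]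
import Mathlib
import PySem

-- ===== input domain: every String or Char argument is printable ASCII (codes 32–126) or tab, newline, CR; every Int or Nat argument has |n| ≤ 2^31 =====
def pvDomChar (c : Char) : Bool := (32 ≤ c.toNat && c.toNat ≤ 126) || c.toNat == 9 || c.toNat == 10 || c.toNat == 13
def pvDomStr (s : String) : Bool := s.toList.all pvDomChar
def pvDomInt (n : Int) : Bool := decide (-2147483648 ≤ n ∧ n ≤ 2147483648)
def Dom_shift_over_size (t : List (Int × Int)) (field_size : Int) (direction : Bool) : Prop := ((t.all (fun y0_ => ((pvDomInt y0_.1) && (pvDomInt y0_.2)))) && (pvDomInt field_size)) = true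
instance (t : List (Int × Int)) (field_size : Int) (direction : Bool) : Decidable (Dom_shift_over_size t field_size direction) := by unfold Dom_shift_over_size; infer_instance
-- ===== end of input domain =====

-- B replaces A's one-cell-at-a-time while-loops by computing the whole shift once from
-- max/min of the coordinates on the moved axis (a different algorithm; no speed claim).

-- ===== PORT A =====
-- the two 'while' conditions of A
def pvCondHi (field_size : Int) (t : List (Int × Int)) : Bool :=
  t.any (fun b => decide (b.1 ≥ field_size) || decide (b.2 ≥ field_size))
def pvCondLo (t : List (Int × Int)) : Bool :=
  t.any (fun b => decide (b.1 < 0) || decide (b.2 < 0))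
-- one iteration of the for-loop body (m built by appending the shifted pair for each a)
def pvStepDown (direction : Bool) (t : List (Int × Int)) : List (Int × Int) :=
  t.map (fun a => if direction then (a.1 - 1, a.2) else (a.1, a.2 - 1))
def pvStepUp (direction : Bool) (t : List (Int × Int)) : List (Int × Int) :=
  t.map (fun a => if direction then (a.1 + 1, a.2) else (a.1, a.2 + 1))
-- the two while-loops; the fuel only makes them total: inside Pre_ it exceeds the number
-- of iterations Python performs, so the loop always exits through its condition
def pvLoop1 (field_size : Int) (direction : Bool) : Nat → List (Int × Int) → List (Int × Int)
  | 0, t => t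
  | n + 1, t => if pvCondHi field_size t then pvLoop1 field_size direction n (pvStepDown direction t) else t
def pvLoop2 (direction : Bool) : Nat → List (Int × Int) → List (Int × Int)
  | 0, t => t
  | n + 1, t => if pvCondLo t then pvLoop2 direction n (pvStepUp direction t) else t
def pvFuel (t : List (Int × Int)) (field_size : Int) : Nat :=
  2 * t.foldl (fun s p => s + p.1.natAbs + p.2.natAbs) 0 + field_size.natAbs + 2
def shift_over_size (t : List (Int × Int)) (field_size : Int) (direction : Bool) : List (Int × Int) :=
  pvLoop2 direction (pvFuel t field_size)
    (pvLoop1 field_size direction (pvFuel t field_size) t)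

-- ===== PORT B =====
def shift_over_size_alt (t : List (Int × Int)) (field_size : Int) (direction : Bool) : List (Int × Int) :=
  if t = [] then []
  else
    let ax := t.map (fun a => if direction then a.1 else a.2)
    match PySem.List.max? ax (fun x => x), PySem.List.min? ax (fun x => x) with
    | some mx, some mn =>
      let s1 := max 0 (mx - field_size + 1)
      let s2 := max 0 (s1 - mn)
      let d := s2 - s1
      if direction then t.map (fun p => (p.1 + d, p.2)) else t.map (fun p => (p.1, p.2 + d))
    | _, _ => []  -- unreachable: ax is nonempty

-- ===== PRECONDITION & SPEC =====
-- Pre_ excludes exactly the inputs on which A loops FOREVER: an off-axis coordinate that is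
-- ≥ field_size or < 0 can never be fixed by shifting the chosen axis, so A never returns there.
def Pre_shift_over_size (t : List (Int × Int)) (field_size : Int) (direction : Bool) : Prop :=
  ∀ p ∈ t, 0 ≤ (if direction then p.2 else p.1) ∧ (if direction then p.2 else p.1) < field_size
instance (t : List (Int × Int)) (field_size : Int) (direction : Bool) : Decidable (Pre_shift_over_size t field_size direction) := by unfold Pre_shift_over_size; infer_instance
def pvWitness_shift_over_size : (List (Int × Int)) × Int × Bool := ([(5, 0), (-2, 2)], 3, true)
def Spec_shift_over_size (t : List (Int × Int)) (field_size : Int) (direction : Bool) (out : List (Int × Int)) : Prop := out = shift_over_size_alt t field_size direction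
instance (t : List (Int × Int)) (field_size : Int) (direction : Bool) (out : List (Int × Int)) : Decidable (Spec_shift_over_size t field_size direction out) := by unfold Spec_shift_over_size; infer_instance

-- ===== CLAIM (what is proved, stated in full; the proofs are below) =====
def Claim_equal_shift_over_size : Prop := ∀ (t : List (Int × Int)) (field_size : Int) (direction : Bool), Dom_shift_over_size t field_size direction → Pre_shift_over_size t field_size direction → Spec_shift_over_size t field_size direction (shift_over_size t field_size direction)

-- ===== LEMMAS AND PROOFS =====
-- the coordinate on the moved axis
def pvAx (direction : Bool) (p : Int × Int) : Int := if direction then p.1 else p.2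
-- shifting the whole shadow by k toward / away from zero on the moved axis
def pvDownMap (direction : Bool) (k : Int) (t : List (Int × Int)) : List (Int × Int) :=
  t.map (fun p => if direction then (p.1 - k, p.2) else (p.1, p.2 - k))
def pvUpMap (direction : Bool) (k : Int) (t : List (Int × Int)) : List (Int × Int) :=
  t.map (fun p => if direction then (p.1 + k, p.2) else (p.1, p.2 + k))
def pvSum (t : List (Int × Int)) : Nat := t.foldl (fun s q => s + q.1.natAbs + q.2.natAbs) 0

theorem pvDownMap_zero (d : Bool) (t : List (Int × Int)) : pvDownMap d 0 t = t := by
  cases d <;> simp [pvDownMap]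

theorem pvUpMap_zero (d : Bool) (t : List (Int × Int)) : pvUpMap d 0 t = t := by
  cases d <;> simp [pvUpMap]

theorem pvDownMap_step (d : Bool) (k : Int) (t : List (Int × Int)) :
    pvDownMap d k (pvStepDown d t) = pvDownMap d (k + 1) t := by
  cases d <;> simp [pvDownMap, pvStepDown, List.map_map, Function.comp_def] <;> intros <;> ring

theorem pvUpMap_step (d : Bool) (k : Int) (t : List (Int × Int)) :
    pvUpMap d k (pvStepUp d t) = pvUpMap d (k + 1) t := by
  cases d <;> simp [pvUpMap, pvStepUp, List.map_map, Function.comp_def] <;> intros <;> ring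

theorem pvAx_stepDown (d : Bool) (t : List (Int × Int)) :
    (pvStepDown d t).map (pvAx d) = (t.map (pvAx d)).map (fun x => x - 1) := by
  cases d <;> simp [pvStepDown, pvAx, List.map_map, Function.comp_def]

theorem pvAx_stepUp (d : Bool) (t : List (Int × Int)) :
    (pvStepUp d t).map (pvAx d) = (t.map (pvAx d)).map (fun x => x + 1) := by
  cases d <;> simp [pvStepUp, pvAx, List.map_map, Function.comp_def]

theorem pvAx_downMap (d : Bool) (k : Int) (t : List (Int × Int)) :
    (pvDownMap d k t).map (pvAx d) = (t.map (pvAx d)).map (fun x => x - k) := by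
  cases d <;> simp [pvDownMap, pvAx, List.map_map, Function.comp_def]

theorem pvFoldl_max_add (t : List Int) (c : Int) : ∀ x : Int,
    (t.map (fun y => y + c)).foldl max (x + c) = t.foldl max x + c := by
  induction t with
  | nil => intro x; simp
  | cons y t ih => intro x; simp only [List.map_cons, List.foldl_cons, max_add_add_right]; exact ih _

theorem pvFoldl_min_add (t : List Int) (c : Int) : ∀ x : Int,
    (t.map (fun y => y + c)).foldl min (x + c) = t.foldl min x + c := by
  induction t with
  | nil => intro x; simp
  | cons y t ih => intro x; simp only [List.map_cons, List.foldl_cons, min_add_add_right]; exact ih _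

theorem pvMax?_map_add (xs : List Int) (c mx : Int)
    (h : PySem.List.max? xs (fun x => x) = some mx) :
    PySem.List.max? (xs.map (fun x => x + c)) (fun x => x) = some (mx + c) := by
  cases xs with
  | nil =>
    have hn : PySem.List.max? ([] : List Int) (fun x => x) = none :=
      (PySem.List.max?_eq_none_iff _ _).mpr rfl
    rw [hn] at h; exact absurd h (by simp)
  | cons x t =>
    rw [PySem.List.max?_id_cons] at h
    rw [List.map_cons, PySem.List.max?_id_cons, pvFoldl_max_add]
    simp at h; simp [h]

theorem pvMin?_map_add (xs : List Int) (c mn : Int)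
    (h : PySem.List.min? xs (fun x => x) = some mn) :
    PySem.List.min? (xs.map (fun x => x + c)) (fun x => x) = some (mn + c) := by
  cases xs with
  | nil =>
    have hn : PySem.List.min? ([] : List Int) (fun x => x) = none :=
      (PySem.List.min?_eq_none_iff _ _).mpr rfl
    rw [hn] at h; exact absurd h (by simp)
  | cons x t =>
    rw [PySem.List.min?_id_cons] at h
    rw [List.map_cons, PySem.List.min?_id_cons, pvFoldl_min_add]
    simp at h; simp [h]

theorem pvPre_stepDown (t : List (Int × Int)) (fs : Int) (d : Bool)
    (hp : Pre_shift_over_size t fs d) : Pre_shift_over_size (pvStepDown d t) fs d := by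
  intro p hmem
  rcases List.mem_map.mp hmem with ⟨q, hq, rfl⟩
  have := hp q hq
  cases d <;> simp_all

theorem pvPre_downMap (t : List (Int × Int)) (fs k : Int) (d : Bool)
    (hp : Pre_shift_over_size t fs d) : Pre_shift_over_size (pvDownMap d k t) fs d := by
  intro p hmem
  rcases List.mem_map.mp hmem with ⟨q, hq, rfl⟩
  have := hp q hq
  cases d <;> simp_all

theorem pvPre_stepUp (t : List (Int × Int)) (fs : Int) (d : Bool)
    (hp : Pre_shift_over_size t fs d) : Pre_shift_over_size (pvStepUp d t) fs d := by
  intro p hmem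
  rcases List.mem_map.mp hmem with ⟨q, hq, rfl⟩
  have := hp q hq
  cases d <;> simp_all

theorem pvCondHi_iff (fs : Int) (d : Bool) (t : List (Int × Int))
    (hp : Pre_shift_over_size t fs d) :
    pvCondHi fs t = true ↔ ∃ p ∈ t, fs ≤ pvAx d p := by
  simp only [pvCondHi, List.any_eq_true, Bool.or_eq_true, decide_eq_true_eq]
  constructor
  · rintro ⟨p, hpm, h⟩
    have := hp p hpm
    exact ⟨p, hpm, by cases d <;> simp [pvAx] at * <;> omega⟩
  · rintro ⟨p, hpm, h⟩
    exact ⟨p, hpm, by cases d <;> simp [pvAx] at h <;> omega⟩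

theorem pvCondLo_iff (fs : Int) (d : Bool) (t : List (Int × Int))
    (hp : Pre_shift_over_size t fs d) :
    pvCondLo t = true ↔ ∃ p ∈ t, pvAx d p < 0 := by
  simp only [pvCondLo, List.any_eq_true, Bool.or_eq_true, decide_eq_true_eq]
  constructor
  · rintro ⟨p, hpm, h⟩
    have := hp p hpm
    exact ⟨p, hpm, by cases d <;> simp [pvAx] at * <;> omega⟩
  · rintro ⟨p, hpm, h⟩
    exact ⟨p, hpm, by cases d <;> simp [pvAx] at h <;> omega⟩

theorem pvLoop1_eq (fs : Int) (d : Bool) : ∀ (fuel : Nat) (t : List (Int × Int)) (mx : Int),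
    Pre_shift_over_size t fs d →
    PySem.List.max? (t.map (pvAx d)) (fun x => x) = some mx →
    mx - fs + 1 ≤ (fuel : Int) →
    pvLoop1 fs d fuel t = pvDownMap d (max 0 (mx - fs + 1)) t
  | 0, t, mx, hp, hmx, hb => by
      have h0 : max 0 (mx - fs + 1) = 0 := by omega
      rw [h0, pvDownMap_zero]; rfl
  | fuel + 1, t, mx, hp, hmx, hb => by
      by_cases hc : pvCondHi fs t = true
      · rcases (pvCondHi_iff fs d t hp).mp hc with ⟨p, hpm, hge⟩
        have hle : pvAx d p ≤ mx :=
          PySem.List.max?_isMax hmx _ (List.mem_map.mpr ⟨p, hpm, rfl⟩)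
        have hpos : 0 < mx - fs + 1 := by omega
        have hmx' : PySem.List.max? ((pvStepDown d t).map (pvAx d)) (fun x => x) = some (mx + (-1)) := by
          rw [pvAx_stepDown]
          have := pvMax?_map_add (t.map (pvAx d)) (-1) mx hmx
          simpa [sub_eq_add_neg] using this
        have ih := pvLoop1_eq fs d fuel (pvStepDown d t) (mx + (-1))
          (pvPre_stepDown t fs d hp) hmx' (by omega)
        have hstep : pvLoop1 fs d (fuel + 1) t = pvLoop1 fs d fuel (pvStepDown d t) := by
          simp [pvLoop1, hc]
        rw [hstep, ih, pvDownMap_step]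
        congr 1; omega
      · have hall : ∀ p ∈ t, pvAx d p < fs := by
          intro p hpm
          by_contra h
          exact hc ((pvCondHi_iff fs d t hp).mpr ⟨p, hpm, by omega⟩)
        have hmem : mx ∈ t.map (pvAx d) := PySem.List.max?_mem hmx
        rcases List.mem_map.mp hmem with ⟨q, hq, rfl⟩
        have h0 : max 0 (pvAx d q - fs + 1) = 0 := by have := hall q hq; omega
        rw [h0, pvDownMap_zero]
        simp [pvLoop1, hc]

theorem pvLoop2_eq (fs : Int) (d : Bool) : ∀ (fuel : Nat) (t : List (Int × Int)) (mn : Int),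
    Pre_shift_over_size t fs d →
    PySem.List.min? (t.map (pvAx d)) (fun x => x) = some mn →
    -mn ≤ (fuel : Int) →
    pvLoop2 d fuel t = pvUpMap d (max 0 (-mn)) t
  | 0, t, mn, hp, hmn, hb => by
      have h0 : max 0 (-mn) = 0 := by omega
      rw [h0, pvUpMap_zero]; rfl
  | fuel + 1, t, mn, hp, hmn, hb => by
      by_cases hc : pvCondLo t = true
      · rcases (pvCondLo_iff fs d t hp).mp hc with ⟨p, hpm, hlt⟩
        have hle : mn ≤ pvAx d p :=
          PySem.List.min?_isMin hmn _ (List.mem_map.mpr ⟨p, hpm, rfl⟩)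
        have hpos : 0 < -mn := by omega
        have hmn' : PySem.List.min? ((pvStepUp d t).map (pvAx d)) (fun x => x) = some (mn + 1) := by
          rw [pvAx_stepUp]
          exact pvMin?_map_add (t.map (pvAx d)) 1 mn hmn
        have ih := pvLoop2_eq fs d fuel (pvStepUp d t) (mn + 1)
          (pvPre_stepUp t fs d hp) hmn' (by omega)
        have hstep : pvLoop2 d (fuel + 1) t = pvLoop2 d fuel (pvStepUp d t) := by
          simp [pvLoop2, hc]
        rw [hstep, ih, pvUpMap_step]
        congr 1; omega
      · have hall : ∀ p ∈ t, 0 ≤ pvAx d p := by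
          intro p hpm
          by_contra h
          exact hc ((pvCondLo_iff fs d t hp).mpr ⟨p, hpm, by omega⟩)
        have hmem : mn ∈ t.map (pvAx d) := PySem.List.min?_mem hmn
        rcases List.mem_map.mp hmem with ⟨q, hq, rfl⟩
        have h0 : max 0 (-(pvAx d q)) = 0 := by have := hall q hq; omega
        rw [h0, pvUpMap_zero]
        simp [pvLoop2, hc]

theorem pvLe_foldl_sum (t : List (Int × Int)) : ∀ c : Nat,
    c ≤ t.foldl (fun s q => s + q.1.natAbs + q.2.natAbs) c := by
  induction t with
  | nil => intro c; simp
  | cons q t ih => intro c; simp only [List.foldl_cons]; exact le_trans (by omega) (ih _)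

theorem pvSum_bound (t : List (Int × Int)) : ∀ (c : Nat), ∀ p ∈ t,
    p.1.natAbs + p.2.natAbs ≤ t.foldl (fun s q => s + q.1.natAbs + q.2.natAbs) c := by
  induction t with
  | nil => simp
  | cons q t ih =>
    intro c p hp
    rcases List.mem_cons.mp hp with rfl | hp
    · simp only [List.foldl_cons]
      exact le_trans (by omega) (pvLe_foldl_sum t _)
    · exact ih _ p hp

theorem pvAx_abs_le (d : Bool) (t : List (Int × Int)) (q : Int × Int) (hq : q ∈ t) :
    (pvAx d q).natAbs ≤ pvSum t := by
  have := pvSum_bound t 0 q hq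
  cases d <;> simp [pvAx, pvSum] <;> omega

-- ===== VERDICT (by name: the statement is the Claim_ definition above) =====
theorem shift_over_size_spec : Claim_equal_shift_over_size := by
  intro t fs d _ hp
  unfold Spec_shift_over_size
  cases t with
  | nil =>
    have h1 : ∀ fuel, pvLoop1 fs d fuel [] = [] := by
      intro fuel; cases fuel <;> simp [pvLoop1, pvCondHi]
    have h2 : ∀ fuel, pvLoop2 d fuel [] = [] := by
      intro fuel; cases fuel <;> simp [pvLoop2, pvCondLo]
    simp [shift_over_size, shift_over_size_alt, h1, h2]
  | cons p r =>
    -- names for max / min of the moved-axis coordinates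
    set mx := (r.map (pvAx d)).foldl max (pvAx d p) with hmxdef
    set mn := (r.map (pvAx d)).foldl min (pvAx d p) with hmndef
    have haxcons : (p :: r).map (pvAx d) = pvAx d p :: r.map (pvAx d) := by simp
    have hmx : PySem.List.max? ((p :: r).map (pvAx d)) (fun x => x) = some mx := by
      rw [haxcons, PySem.List.max?_id_cons]
    have hmn : PySem.List.min? ((p :: r).map (pvAx d)) (fun x => x) = some mn := by
      rw [haxcons, PySem.List.min?_id_cons]
    -- size bounds feeding the fuel estimate
    have hmxmem := PySem.List.max?_mem hmx
    have hmnmem := PySem.List.min?_mem hmn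
    rcases List.mem_map.mp hmxmem with ⟨qx, hqx, hqxe⟩
    rcases List.mem_map.mp hmnmem with ⟨qn, hqn, hqne⟩
    have hbx : mx.natAbs ≤ pvSum (p :: r) := hqxe ▸ pvAx_abs_le d _ qx hqx
    have hbn : mn.natAbs ≤ pvSum (p :: r) := hqne ▸ pvAx_abs_le d _ qn hqn
    have hfuel : (pvFuel (p :: r) fs : Int) = 2 * (pvSum (p :: r) : Int) + (fs.natAbs : Int) + 2 := by
      simp [pvFuel, pvSum]
    -- run the two loops
    have h1 := pvLoop1_eq fs d (pvFuel (p :: r) fs) (p :: r) mx hp hmx (by omega)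
    set s1 := max 0 (mx - fs + 1) with hs1def
    have hmn1 : PySem.List.min? ((pvDownMap d s1 (p :: r)).map (pvAx d)) (fun x => x)
        = some (mn + -s1) := by
      rw [pvAx_downMap]
      have := pvMin?_map_add ((p :: r).map (pvAx d)) (-s1) mn hmn
      simpa [sub_eq_add_neg] using this
    have h2 := pvLoop2_eq fs d (pvFuel (p :: r) fs) (pvDownMap d s1 (p :: r)) (mn + -s1)
      (pvPre_downMap _ fs s1 d hp) hmn1 (by omega)
    have hA : shift_over_size (p :: r) fs d
        = pvUpMap d (max 0 (-(mn + -s1))) (pvDownMap d s1 (p :: r)) := by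
      rw [shift_over_size, h1, h2]
    -- unfold B to the same closed form
    have hB : shift_over_size_alt (p :: r) fs d
        = (if d then (p :: r).map (fun q => (q.1 + (max 0 (s1 - mn) - s1), q.2))
           else (p :: r).map (fun q => (q.1, q.2 + (max 0 (s1 - mn) - s1)))) := by
      rw [shift_over_size_alt]
      simp only [if_neg (List.cons_ne_nil p r)]
      have haxB : (p :: r).map (fun a => if d then a.1 else a.2) = (p :: r).map (pvAx d) := by
        simp [pvAx]
      rw [haxB, hmx, hmn]
    rw [hA, hB]
    have hs2 : -(mn + -s1) = s1 - mn := by ring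
    rw [hs2]
    cases d <;>
      simp [pvUpMap, pvDownMap, List.map_map, Function.comp_def] <;>
      (try constructor) <;> intros <;> omega
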